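-- pv_equiv track=rewrite | github.com/pangzike/bishe | FG2Seq-master/utils/utils_Ent_woz_more_entities.py | generate_frequency_db
-- ===== SOURCE A (Python) =====
-- def get_all_db_attribute(all_db):
--     all_db_attribute = [
--         [v for k, v in entity.items()]
--         for entity in all_db
--     ]
--     return all_db_attribute
--
-- def generate_frequency_db(all_db, dialog_origin):
--     # get all attribute of all entity
--     # 把dialog拼成一个字符串
--     dialog = []
--     for i in dialog_origin:
--         dialog.extend(i)
--
--     dialog = " ".join(dialog)
--     frequency_score = [0]*len(all_db)
--     all_db_attribute = get_all_db_attribute(all_db)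
--     all_db_attribute = [[v.replace("_", " ") for v in entity_attribute] for entity_attribute in all_db_attribute]
--     for i, entity in enumerate(all_db_attribute):
--         for attribute in entity:
--             if attribute in dialog:
--                 frequency_score[i] += 1
--     # 取frequency_score最大的7个
--     frequency_index = sorted(range(len(frequency_score)), key=lambda k: frequency_score[k], reverse=True)[:7]
--     frequency_db = [all_db[i] for i in frequency_index]
--     return frequency_db
-- ===== SOURCE B (Python) =====
-- def generate_frequency_db(all_db, dialog_origin):
--     # Bucket selection by distinct scores (descending) instead of stable-sorting an index list.
--     dialog = " ".join(w for turn in dialog_origin for w in turn)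
--     scored = [
--         (sum(v.replace("_", " ") in dialog for v in entity.values()), entity)
--         for entity in all_db
--     ]
--     buckets = []
--     for sc in sorted({s for s, _ in scored}, reverse=True):
--         buckets.extend(e for s, e in scored if s == sc)
--     return buckets[:7]
-- ===== Notes on version B (the rewrite author's own statement) =====
-- stated objective: alternative
-- what changed: B fuses the scoring into one pass per entity (no attribute matrix, no mutable score array) and replaces A's stable reverse sort of an index list by bucket selection: iterate the distinct scores in descending order and collect matching entities in original order, then take the first 7.
import Mathlib
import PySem

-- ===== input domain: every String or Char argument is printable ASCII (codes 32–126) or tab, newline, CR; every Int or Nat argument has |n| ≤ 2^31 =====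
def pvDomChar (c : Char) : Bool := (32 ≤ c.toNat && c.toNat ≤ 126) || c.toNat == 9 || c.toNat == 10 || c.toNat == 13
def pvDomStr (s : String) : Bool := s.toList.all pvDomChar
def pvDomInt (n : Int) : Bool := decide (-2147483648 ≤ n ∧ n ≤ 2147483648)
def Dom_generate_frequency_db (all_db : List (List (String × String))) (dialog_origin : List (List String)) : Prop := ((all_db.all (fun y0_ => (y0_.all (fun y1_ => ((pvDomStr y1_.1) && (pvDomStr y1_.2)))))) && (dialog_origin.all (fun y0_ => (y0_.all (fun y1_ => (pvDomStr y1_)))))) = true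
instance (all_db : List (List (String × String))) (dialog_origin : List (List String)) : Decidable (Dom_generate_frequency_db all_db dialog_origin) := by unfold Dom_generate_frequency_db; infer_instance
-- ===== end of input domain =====

-- B replaces A's stable index sort by bucket selection over the distinct scores in descending
-- order (objective: alternative decomposition, same cost).

-- ===== PORT A =====
def get_all_db_attribute (all_db : List (List (String × String))) : List (List String) :=
  all_db.map (fun entity => entity.map (fun kv => kv.2))

def generate_frequency_db (all_db : List (List (String × String))) (dialog_origin : List (List String)) : List (List (String × String)) :=
  let dialog0 := dialog_origin.foldl (fun acc i => acc ++ i) []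
  let dialog := PySem.Str.join " " dialog0
  let frequency_score0 : List Int := List.replicate all_db.length 0
  let all_db_attribute0 := get_all_db_attribute all_db
  let all_db_attribute := all_db_attribute0.map (fun ea => ea.map (fun v => PySem.Str.replace v "_" " "))
  let frequency_score := (PySem.List.enumerate all_db_attribute).foldl (fun fs p =>
      p.2.foldl (fun fs attr =>
        if PySem.Str.isIn attr dialog then
          PySem.List.pySetD fs p.1 (PySem.List.pyGetD fs p.1 0 + 1)  -- frequency_score[i] += 1, i always in range
        else fs) fs) frequency_score0
  let frequency_index := PySem.List.slice
      (PySem.List.sorted (PySem.List.pyRange 0 (frequency_score.length : Int) 1)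
        (fun k => PySem.List.pyGetD frequency_score k 0) true) none (some 7)
  frequency_index.map (fun i => PySem.List.pyGetD all_db i [])  -- all_db[i], i always in range

-- ===== PORT B =====
def generate_frequency_db_alt (all_db : List (List (String × String))) (dialog_origin : List (List String)) : List (List (String × String)) :=
  let dialog := PySem.Str.join " " (dialog_origin.flatMap (fun turn => turn))
  let scored : List (Int × List (String × String)) := all_db.map (fun entity =>
      ((entity.map (fun kv => kv.2)).foldl
        (fun s v => s + (if PySem.Str.isIn (PySem.Str.replace v "_" " ") dialog then 1 else 0)) 0,
       entity))
  let buckets := (PySem.List.sorted (PySem.Set.ofList (scored.map (fun p => p.1))) (fun x => x) true).foldl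
      (fun acc sc => acc ++ (scored.filter (fun p => p.1 == sc)).map (fun p => p.2)) []
  PySem.List.slice buckets none (some 7)

-- ===== PRECONDITION & SPEC =====
def Spec_generate_frequency_db (all_db : List (List (String × String))) (dialog_origin : List (List String)) (out : List (List (String × String))) : Prop := out = generate_frequency_db_alt all_db dialog_origin
instance (all_db : List (List (String × String))) (dialog_origin : List (List String)) (out : List (List (String × String))) : Decidable (Spec_generate_frequency_db all_db dialog_origin out) := by unfold Spec_generate_frequency_db; infer_instance

-- ===== CLAIM (what is proved, stated in full; the proofs are below) =====
def Claim_equal_generate_frequency_db : Prop := ∀ (all_db : List (List (String × String))) (dialog_origin : List (List String)), Dom_generate_frequency_db all_db dialog_origin → Spec_generate_frequency_db all_db dialog_origin (generate_frequency_db all_db dialog_origin)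

-- ===== LEMMAS AND PROOFS =====


-- helper notions used only by the proofs
def pvRelK (key : Int → Int) (a b : Int) : Prop :=
  key b < key a ∨ (key a = key b ∧ a < b)

def pvHit (D : String) (v : String) : Bool := PySem.Str.isIn (PySem.Str.replace v "_" " ") D

def pvCnt (D : String) (e : List (String × String)) : Int :=
  ((e.map (fun kv => kv.2)).countP (pvHit D) : Int)

-- A's inner attribute loop only ever touches slot j
theorem pvInnerNat (p : String → Bool) (attrs : List String) : ∀ (fs : List Int) (j : Nat),
    attrs.foldl (fun fs a => if p a = true then fs.set j (fs.getD j 0 + 1) else fs) fs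
      = fs.set j (fs.getD j 0 + (attrs.countP p : Int)) := by
  induction attrs with
  | nil =>
    intro fs j
    simp only [List.foldl_nil, List.countP_nil, Nat.cast_zero, add_zero]
    by_cases hj : j < fs.length
    · rw [List.getD_eq_getElem fs 0 hj, List.set_getElem_self]
    · rw [List.set_eq_of_length_le (Nat.le_of_not_lt hj)]
  | cons a as ih =>
    intro fs j
    by_cases hj : j < fs.length
    · by_cases hp : p a = true
      · rw [List.foldl_cons, if_pos hp, ih]
        rw [List.set_set, List.getD_eq_getElem _ 0 (by simpa using hj),
          List.getElem_set_self, List.countP_cons_of_pos hp]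
        congr 1
        push_cast
        ring
      · rw [List.foldl_cons, if_neg hp, ih]
        simp [hp]
    · have hle := Nat.le_of_not_lt hj
      have hfix : ∀ (c : Int), fs.set j c = fs := fun c => List.set_eq_of_length_le hle
      rw [List.foldl_cons]
      have hstep : (if p a = true then fs.set j (fs.getD j 0 + 1) else fs) = fs := by
        split
        · exact hfix _
        · rfl
      rw [hstep, ih, hfix, hfix]

-- A's enumerate loop fills the score slots left to right
theorem pvOuter (p : String → Bool) (l : List (List String)) : ∀ (pre : List Int),
    (PySem.List.enumerate l (pre.length : Int)).foldl
      (fun fs q => q.2.foldl (fun fs a =>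
        if p a = true then PySem.List.pySetD fs q.1 (PySem.List.pyGetD fs q.1 0 + 1) else fs) fs)
      (pre ++ List.replicate l.length 0)
    = pre ++ l.map (fun attrs => (attrs.countP p : Int)) := by
  induction l with
  | nil => intro pre; simp
  | cons attrs l' ih =>
    intro pre
    rw [PySem.List.enumerate_cons, List.foldl_cons]
    have hstep :
        attrs.foldl (fun fs a =>
          if p a = true then PySem.List.pySetD fs ((pre.length : Int)) (PySem.List.pyGetD fs ((pre.length : Int)) 0 + 1) else fs)
          (pre ++ List.replicate (attrs :: l').length 0)
        = (pre ++ [(attrs.countP p : Int)]) ++ List.replicate l'.length 0 := by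
      simp only [PySem.List.pySetD_natCast, PySem.List.pyGetD_natCast]
      rw [pvInnerNat]
      rw [List.length_cons, List.replicate_succ]
      rw [List.getD_append_right _ _ _ _ (Nat.le_refl _), Nat.sub_self, List.getD_cons_zero,
        List.set_append]
      simp
    rw [hstep]
    have hlen : (pre.length : Int) + 1 = (((pre ++ [(attrs.countP p : Int)]).length : Nat) : Int) := by
      simp
    rw [hlen, ih (pre ++ [(attrs.countP p : Int)])]
    simp

-- B's 0/1 sum is a countP
theorem pvCountB (p : String → Bool) (l : List String) :
    l.foldl (fun s v => s + (if p v = true then (1 : Int) else 0)) 0 = (l.countP p : Int) := by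
  have h : (fun (s : Int) (v : String) => s + (if p v = true then (1 : Int) else 0))
      = (fun (s : Int) (v : String) => if p v = true then s + 1 else s) := by
    funext s v; split <;> omega
  rw [h, PySem.List.foldl_count_if]
  simp

-- stability of the reverse insertion sort over a strictly increasing index list
theorem pvInsertPairwise (key : Int → Int) (x : Int) (acc : List Int)
    (hpw : acc.Pairwise (pvRelK key)) (hlt : ∀ a ∈ acc, a < x) :
    (PySem.List.insertBy (fun a b => decide (key b < key a)) x acc).Pairwise (pvRelK key) := by
  induction acc with
  | nil => simp [PySem.List.insertBy]
  | cons y ys ih =>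
    rw [List.pairwise_cons] at hpw
    obtain ⟨hy, hys⟩ := hpw
    by_cases hb : key y < key x
    · simp only [PySem.List.insertBy, hb, decide_true, if_true]
      refine List.Pairwise.cons ?_ (List.Pairwise.cons hy hys)
      intro z hz
      rw [List.mem_cons] at hz
      rcases hz with rfl | hz
      · exact Or.inl hb
      · rcases hy z hz with h | ⟨h1, h2⟩
        · exact Or.inl (lt_trans h hb)
        · exact Or.inl (h1 ▸ hb)
    · simp only [PySem.List.insertBy, hb, decide_false]
      refine List.Pairwise.cons ?_ (ih hys (fun a ha => hlt a (List.mem_cons_of_mem _ ha)))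
      intro z hz
      rw [PySem.List.mem_insertBy] at hz
      rcases hz with rfl | hz
      · rcases lt_or_eq_of_le (le_of_not_gt hb) with h | h
        · exact Or.inl h
        · exact Or.inr ⟨h.symm, hlt y (List.mem_cons_self)⟩
      · exact hy z hz

theorem pvFoldlPairwise (key : Int → Int) : ∀ (xs acc : List Int),
    xs.Pairwise (· < ·) → acc.Pairwise (pvRelK key) → (∀ a ∈ acc, ∀ x ∈ xs, a < x) →
    (xs.foldl (fun acc x => PySem.List.insertBy (fun a b => decide (key b < key a)) x acc) acc).Pairwise
      (pvRelK key) := by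
  intro xs
  induction xs with
  | nil => intro acc _ hacc _; simpa using hacc
  | cons x xs' ih =>
    intro acc hxs hacc hax
    rw [List.pairwise_cons] at hxs
    obtain ⟨hx, hxs'⟩ := hxs
    rw [List.foldl_cons]
    refine ih _ hxs' (pvInsertPairwise key x acc hacc (fun a ha => hax a ha x List.mem_cons_self)) ?_
    intro a ha z hz
    rw [PySem.List.mem_insertBy] at ha
    rcases ha with rfl | ha
    · exact hx z hz
    · exact hax a ha z (List.mem_cons_of_mem _ hz)

theorem pvSortedStable (key : Int → Int) (xs : List Int) (h : xs.Pairwise (· < ·)) :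
    (PySem.List.sorted xs key true).Pairwise (pvRelK key) := by
  rw [PySem.List.sorted_rev_eq_foldl_insertBy]
  exact pvFoldlPairwise key xs [] h (List.Pairwise.nil) (by simp)

-- a partition of xs by the distinct values of f is a permutation of xs
theorem pvPermFlatMapFilter {α κ : Type} [BEq κ] [LawfulBEq κ] : ∀ (vs : List κ) (xs : List α)
    (f : α → κ), vs.Nodup → (∀ x ∈ xs, f x ∈ vs) →
    (vs.flatMap (fun v => xs.filter (fun x => f x == v))).Perm xs := by
  intro vs
  induction vs with
  | nil =>
    intro xs f _ hmem
    cases xs with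
    | nil => simp
    | cons x xs' => exact absurd (hmem x List.mem_cons_self) (List.not_mem_nil)
  | cons v vs' ih =>
    intro xs f hnd hmem
    rw [List.nodup_cons] at hnd
    obtain ⟨hv, hnd'⟩ := hnd
    rw [List.flatMap_cons]
    have hcongr : ∀ v' ∈ vs', xs.filter (fun x => f x == v')
        = (xs.filter (fun x => !(f x == v))).filter (fun x => f x == v') := by
      intro v' hv'
      rw [List.filter_filter]
      refine (List.filter_congr ?_).symm
      intro x _
      by_cases h : (f x == v') = true
      · have : ¬ (f x == v) = true := by
          simp only [beq_iff_eq] at h ⊢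
          rintro rfl
          exact hv (h ▸ hv')
        simp [h, this]
      · simp [h]
    rw [List.flatMap_congr hcongr]
    have hmem' : ∀ x ∈ xs.filter (fun x => !(f x == v)), f x ∈ vs' := by
      intro x hx
      rw [List.mem_filter] at hx
      have hx2 := hmem x hx.1
      rw [List.mem_cons] at hx2
      rcases hx2 with h | h
      · simp [h] at hx
      · exact h
    refine List.Perm.trans (List.Perm.append_left _ (ih _ f hnd' hmem')) ?_
    exact List.filter_append_perm _ xs

-- reading a bucket of indices back through the list is a filter of the list
theorem pvFiltMapNat {α : Type} (f : α → Int) (sc : Int) (d : α) : ∀ (l : List α),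
    ((List.range l.length).filter (fun k => (l.map f).getD k 0 == sc)).map (fun k => l.getD k d)
      = l.filter (fun e => f e == sc) := by
  intro l
  induction l with
  | nil => simp
  | cons e es ih =>
    rw [List.length_cons, List.range_succ_eq_map, List.filter_cons]
    simp only [List.getD_cons_zero, List.map_cons, List.filter_map, Function.comp_def,
      List.getD_cons_succ, List.filter_cons]
    by_cases h : (f e == sc) = true
    · simp only [h, if_true, List.map_cons, List.getD_cons_zero, List.map_map, Function.comp_def,
        Nat.succ_eq_add_one, List.getD_cons_succ]
      rw [ih]
    · simp only [h, Bool.false_eq_true, if_false, List.map_map, Function.comp_def,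
        Nat.succ_eq_add_one, List.getD_cons_succ]
      rw [ih]

-- the heart: A's stable reverse index sort = B's buckets by distinct scores descending
theorem pvSel (S : List Int) :
    PySem.List.sorted (PySem.List.pyRange 0 (S.length : Int) 1) (fun k => PySem.List.pyGetD S k 0) true
      = (PySem.List.sorted (PySem.Set.ofList S) (fun x => x) true).flatMap
          (fun sc => ((List.range S.length).map (fun k : Nat => (k : Int))).filter
            (fun i => PySem.List.pyGetD S i 0 == sc)) := by
  have hidx : PySem.List.pyRange 0 (S.length : Int) 1 = (List.range S.length).map (fun k : Nat => (k : Int)) :=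
    PySem.List.pyRange_zero_natCast S.length
  have hpwidx : ((List.range S.length).map (fun k : Nat => (k : Int))).Pairwise (· < ·) := by
    rw [List.pairwise_map]
    exact List.pairwise_lt_range.imp (fun h => by exact_mod_cast h)
  have hnd : (PySem.List.sorted (PySem.Set.ofList S) (fun x => x) true).Nodup :=
    ((PySem.List.sorted_perm _ _ _).nodup_iff).mpr (PySem.Set.nodup_ofList S)
  have hdesc : (PySem.List.sorted (PySem.Set.ofList S) (fun x => x) true).Pairwise (fun a b => b < a) := by
    have h1 := PySem.List.sorted_pairwise_rev (PySem.Set.ofList S) (fun x => x)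
    exact (List.Pairwise.and h1 hnd).imp (fun h => lt_of_le_of_ne h.1 (fun he => h.2 he.symm))
  have hmemd : ∀ x ∈ (List.range S.length).map (fun k : Nat => (k : Int)),
      PySem.List.pyGetD S x 0 ∈ PySem.List.sorted (PySem.Set.ofList S) (fun x => x) true := by
    intro x hx
    rw [List.mem_map] at hx
    obtain ⟨k, hk, rfl⟩ := hx
    rw [List.mem_range] at hk
    rw [PySem.List.mem_sorted, PySem.Set.mem_ofList, PySem.List.pyGetD_natCast,
      List.getD_eq_getElem _ _ hk]
    exact List.getElem_mem hk
  have hperm := pvPermFlatMapFilter (PySem.List.sorted (PySem.Set.ofList S) (fun x => x) true)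
    ((List.range S.length).map (fun k : Nat => (k : Int))) (fun i => PySem.List.pyGetD S i 0) hnd hmemd
  refine List.Perm.eq_of_pairwise (le := pvRelK (fun k => PySem.List.pyGetD S k 0)) ?_ ?_ ?_ ?_
  · intro a b _ _ h1 h2
    rcases h1 with h1 | h1 <;> rcases h2 with h2 | h2
    · exact absurd h2 (lt_asymm h1)
    · exact absurd h1 (by rw [h2.1]; exact lt_irrefl _)
    · exact absurd h2 (by rw [h1.1]; exact lt_irrefl _)
    · exact absurd h2.2 (lt_asymm h1.2)
  · rw [hidx]
    exact pvSortedStable (fun k => PySem.List.pyGetD S k 0) _ hpwidx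
  · rw [List.pairwise_flatMap]
    constructor
    · intro sc _
      refine List.Pairwise.imp_of_mem ?_ (List.Pairwise.filter _ hpwidx)
      intro a b ha hb hab
      rw [List.mem_filter] at ha hb
      have ea : PySem.List.pyGetD S a 0 = sc := by simpa using ha.2
      have eb : PySem.List.pyGetD S b 0 = sc := by simpa using hb.2
      exact Or.inr ⟨ea.trans eb.symm, hab⟩
    · refine hdesc.imp ?_
      intro sc sc' hlt x hx y hy
      rw [List.mem_filter] at hx hy
      have ex : PySem.List.pyGetD S x 0 = sc := by simpa using hx.2
      have ey : PySem.List.pyGetD S y 0 = sc' := by simpa using hy.2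
      refine Or.inl ?_
      show PySem.List.pyGetD S y 0 < PySem.List.pyGetD S x 0
      rw [ex, ey]; exact hlt
  · exact (PySem.List.sorted_perm _ _ _).trans (hidx ▸ hperm.symm)

theorem main_eq (all_db : List (List (String × String))) (dialog_origin : List (List String)) :
    generate_frequency_db all_db dialog_origin = generate_frequency_db_alt all_db dialog_origin := by
  simp only [generate_frequency_db, generate_frequency_db_alt, get_all_db_attribute]
  rw [show dialog_origin.foldl (fun acc i => acc ++ i) ([] : List String)
      = dialog_origin.flatMap (fun turn => turn) from by
    simpa using PySem.List.foldl_append_eq_flatMap (fun t : List String => t) dialog_origin []]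
  set D := PySem.Str.join " " (dialog_origin.flatMap (fun turn => turn)) with hD
  -- A's score array is the per-entity count list
  have houter := pvOuter (fun a => PySem.Str.isIn a D)
    ((all_db.map (fun entity => entity.map (fun kv => kv.2))).map
      (fun ea => ea.map (fun v => PySem.Str.replace v "_" " "))) []
  simp only [List.nil_append, List.length_nil, Nat.cast_zero, List.length_map] at houter
  rw [houter]
  have hmapS : ((all_db.map (fun entity => entity.map (fun kv => kv.2))).map
        (fun ea => ea.map (fun v => PySem.Str.replace v "_" " "))).map
        (fun attrs => (attrs.countP (fun a => PySem.Str.isIn a D) : Int))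
      = all_db.map (pvCnt D) := by
    simp [List.map_map, Function.comp_def, List.countP_map, pvCnt, pvHit]
  rw [hmapS]
  -- B's per-entity 0/1 sum is the same count
  have hb1 : ∀ e : List (String × String),
      (e.map (fun kv => kv.2)).foldl
        (fun s v => s + (if PySem.Str.isIn (PySem.Str.replace v "_" " ") D then 1 else 0)) 0
      = pvCnt D e := by
    intro e
    simpa [pvCnt, pvHit] using pvCountB (pvHit D) (e.map (fun kv => kv.2))
  simp only [hb1]
  -- B's buckets foldl is a flatMap
  rw [show ((PySem.List.sorted (PySem.Set.ofList ((all_db.map (fun e => (pvCnt D e, e))).map (fun p => p.1))) (fun x => x) true).foldl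
      (fun acc sc => acc ++ ((all_db.map (fun e => (pvCnt D e, e))).filter (fun p => p.1 == sc)).map (fun p => p.2)) [])
      = (PySem.List.sorted (PySem.Set.ofList ((all_db.map (fun e => (pvCnt D e, e))).map (fun p => p.1))) (fun x => x) true).flatMap
        (fun sc => ((all_db.map (fun e => (pvCnt D e, e))).filter (fun p => p.1 == sc)).map (fun p => p.2)) from by
    simpa using PySem.List.foldl_append_eq_flatMap
      (fun sc => ((all_db.map (fun e => (pvCnt D e, e))).filter (fun p => p.1 == sc)).map (fun p => p.2))
      (PySem.List.sorted (PySem.Set.ofList ((all_db.map (fun e => (pvCnt D e, e))).map (fun p => p.1))) (fun x => x) true) []]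
  rw [pvSel (all_db.map (pvCnt D))]
  rw [PySem.List.slice_to _ (by norm_num : (0:Int) ≤ 7), PySem.List.slice_to _ (by norm_num : (0:Int) ≤ 7)]
  rw [List.map_take, List.map_flatMap]
  have hbucket : ∀ sc : Int,
      (((List.range (all_db.map (pvCnt D)).length).map (fun k : Nat => (k : Int))).filter
        (fun i => PySem.List.pyGetD (all_db.map (pvCnt D)) i 0 == sc)).map
        (fun i => PySem.List.pyGetD all_db i ([] : List (String × String)))
      = all_db.filter (fun e => pvCnt D e == sc) := by
    intro sc
    rw [List.filter_map, List.map_map]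
    have h := pvFiltMapNat (pvCnt D) sc ([] : List (String × String)) all_db
    simpa [Function.comp_def, PySem.List.pyGetD_natCast, List.length_map] using h
  simp only [hbucket]
  simp only [List.map_map, Function.comp_def, List.filter_map]
  simp

-- ===== VERDICT (by name: the statement is the Claim_ definition above) =====
theorem generate_frequency_db_spec : Claim_equal_generate_frequency_db := by
  intro all_db dialog_origin _
  exact main_eq all_db dialog_origin
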